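-- pv_equiv track=rewrite | github.com/MichalHeron/luReleaseOrder | LU_release_ver2.py | search_lu_which_belong_to_the_less_orders_at_all
-- ===== SOURCE A (Python) =====
-- def search_lu_which_belong_to_the_less_orders_at_all(lu_list_set, batch_list):
--     lu_min_list_with_lowest_amount_of_orders = []
--     count = 99999
--     for lu in lu_list_set:
--         if count == batch_list.count(lu):
--             lu_min_list_with_lowest_amount_of_orders.append(lu)
--         if count > batch_list.count(lu):
--             count = batch_list.count(lu)
--             lu_min_list_with_lowest_amount_of_orders = [lu]
--     return lu_min_list_with_lowest_amount_of_orders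
-- ===== SOURCE B (Python) =====
-- def search_lu_which_belong_to_the_less_orders_at_all(lu_list_set, batch_list):
--     counts = [batch_list.count(lu) for lu in lu_list_set]
--     m = min([99999] + counts)
--     return [lu for lu, c in zip(lu_list_set, counts) if c == m]
-- ===== Notes on version B (the rewrite author's own statement) =====
-- stated objective: simpler
-- what changed: Replaced the single-pass running-min with list rebuilds by a build-counts / take-min / zip-filter decomposition (the 99999 sentinel is kept as the min seed, as in A).
import Mathlib
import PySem

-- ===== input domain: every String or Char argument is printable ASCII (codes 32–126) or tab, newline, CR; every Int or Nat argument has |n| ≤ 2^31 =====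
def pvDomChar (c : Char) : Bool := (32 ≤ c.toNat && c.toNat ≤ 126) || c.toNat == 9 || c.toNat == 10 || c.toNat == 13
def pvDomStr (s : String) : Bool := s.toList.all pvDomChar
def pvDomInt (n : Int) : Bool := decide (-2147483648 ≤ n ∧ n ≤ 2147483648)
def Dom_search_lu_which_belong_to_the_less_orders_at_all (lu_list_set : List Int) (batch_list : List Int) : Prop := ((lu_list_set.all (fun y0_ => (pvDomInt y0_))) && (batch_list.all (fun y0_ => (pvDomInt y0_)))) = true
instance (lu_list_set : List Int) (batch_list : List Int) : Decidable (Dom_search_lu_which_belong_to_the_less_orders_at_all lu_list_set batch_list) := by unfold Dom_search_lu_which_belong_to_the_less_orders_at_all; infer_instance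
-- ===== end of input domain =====

-- B replaces A's single-pass running-min with list rebuilds by a simpler build-counts / take-min / zip-filter decomposition (same cost).


-- ===== PORT A =====
-- state = (lu_min_list_with_lowest_amount_of_orders, count); two sequential ifs per element, as in A's loop body
def stepA (batch_list : List Int) (st : List Int × Int) (lu : Int) : List Int × Int :=
  let st1 := if st.2 == (PySem.List.count batch_list lu : Int) then (st.1 ++ [lu], st.2) else st
  if st1.2 > (PySem.List.count batch_list lu : Int) then ([lu], (PySem.List.count batch_list lu : Int)) else st1

def search_lu_which_belong_to_the_less_orders_at_all (lu_list_set : List Int) (batch_list : List Int) : List Int :=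
  (lu_list_set.foldl (stepA batch_list) ([], 99999)).1

-- ===== PORT B =====
-- counts table, then min([99999] + counts), then zip-filter
def search_lu_which_belong_to_the_less_orders_at_all_alt (lu_list_set : List Int) (batch_list : List Int) : List Int :=
  let counts := lu_list_set.map (fun lu => (PySem.List.count batch_list lu : Int))
  let m := counts.foldl min (99999 : Int)
  ((lu_list_set.zip counts).filter (fun p => p.2 == m)).map Prod.fst

-- ===== PRECONDITION & SPEC =====
def Spec_search_lu_which_belong_to_the_less_orders_at_all (lu_list_set : List Int) (batch_list : List Int) (out : List Int) : Prop := out = search_lu_which_belong_to_the_less_orders_at_all_alt lu_list_set batch_list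
instance (lu_list_set : List Int) (batch_list : List Int) (out : List Int) : Decidable (Spec_search_lu_which_belong_to_the_less_orders_at_all lu_list_set batch_list out) := by unfold Spec_search_lu_which_belong_to_the_less_orders_at_all; infer_instance

-- ===== CLAIM (what is proved, stated in full; the proofs are below) =====
def Claim_equal_search_lu_which_belong_to_the_less_orders_at_all : Prop := ∀ (lu_list_set : List Int) (batch_list : List Int), Dom_search_lu_which_belong_to_the_less_orders_at_all lu_list_set batch_list → Spec_search_lu_which_belong_to_the_less_orders_at_all lu_list_set batch_list (search_lu_which_belong_to_the_less_orders_at_all lu_list_set batch_list)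

-- ===== LEMMAS AND PROOFS =====

-- the running min never exceeds its seed
theorem foldl_min_le (batch_list : List Int) (rest : List Int) :
    ∀ (a : Int), rest.foldl (fun a x => min a (PySem.List.count batch_list x : Int)) a ≤ a := by
  induction rest with
  | nil => intro a; simp
  | cons y ys ihy =>
    intro a
    rw [List.foldl_cons]
    exact le_trans (ihy _) (min_le_left _ _)

-- closed form of A's loop: running min and the filtered prefix (acc survives iff the min never drops below c)
theorem loopA_closed (batch_list : List Int) (rest : List Int) :
    ∀ (c : Int) (acc : List Int),
    rest.foldl (stepA batch_list) (acc, c)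
    = ((if rest.foldl (fun a x => min a (PySem.List.count batch_list x : Int)) c = c then acc else [])
        ++ rest.filter (fun x => (PySem.List.count batch_list x : Int) == rest.foldl (fun a x => min a (PySem.List.count batch_list x : Int)) c),
       rest.foldl (fun a x => min a (PySem.List.count batch_list x : Int)) c) := by
  induction rest with
  | nil => intro c acc; simp
  | cons lu rest ih =>
    intro c acc
    simp only [List.foldl_cons]
    set k : Int := (PySem.List.count batch_list lu : Int) with hk
    have hk2 : ((List.count lu batch_list : Nat) : Int) = k := by
      rw [hk, PySem.List.count_eq]
    rcases lt_trichotomy c k with hlt | heq | hgt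
    · -- c < k: both ifs do nothing; state stays (acc, c)
      have hs : stepA batch_list (acc, c) lu = (acc, c) := by
        simp only [stepA, ← hk]
        have h1 : (c == k) = false := by simp [Int.ne_of_lt hlt]
        simp [h1]; omega
      rw [hs, ih c acc]
      simp only [← hk, min_eq_left (le_of_lt hlt)]
      have hm := foldl_min_le batch_list rest c
      set m := rest.foldl (fun a x => min a (PySem.List.count batch_list x : Int)) c with hm'
      have hkm : k ≠ m := by omega
      simp [hk2, hkm]
    · -- c = k: append lu, keep c
      have hs : stepA batch_list (acc, c) lu = (acc ++ [lu], c) := by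
        simp only [stepA, ← hk]
        have h1 : (c == k) = true := by simp [heq]
        simp [h1]; omega
      rw [hs, ih c (acc ++ [lu])]
      simp only [← hk, heq, min_self]
      have hm := foldl_min_le batch_list rest k
      set m := rest.foldl (fun a x => min a (PySem.List.count batch_list x : Int)) k with hm'
      by_cases hmk : m = k
      · simp [hk2, hmk]
      · have hkm : k ≠ m := by omega
        simp [hk2, hmk, hkm]
    · -- c > k: reset to ([lu], k)
      have hs : stepA batch_list (acc, c) lu = ([lu], k) := by
        simp only [stepA, ← hk]
        have h1 : (c == k) = false := by simp; omega
        simp [h1]; omega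
      rw [hs, ih k [lu]]
      simp only [← hk, min_eq_right (le_of_lt hgt)]
      have hm := foldl_min_le batch_list rest k
      set m := rest.foldl (fun a x => min a (PySem.List.count batch_list x : Int)) k with hm'
      have hmc : m ≠ c := by omega
      have hkc : k ≠ c := by omega
      by_cases hmk : m = k
      · simp [hk2, hmk, hkc]
      · have hkm : k ≠ m := by omega
        simp [hk2, hmk, hkm, hmc]

-- B's zip-filter-map over the parallel counts table is the plain filter
theorem zip_filter_map (g : Int → Int) (m : Int) (xs : List Int) :
    ((xs.zip (xs.map g)).filter (fun p => p.2 == m)).map Prod.fst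
      = xs.filter (fun x => g x == m) := by
  induction xs with
  | nil => rfl
  | cons x xs ih =>
    simp only [List.map_cons, List.zip_cons_cons, List.filter_cons]
    by_cases h : g x == m
    · simp [h, ih]
    · simp [h, ih]

-- ===== VERDICT (by name: the statement is the Claim_ definition above) =====
theorem search_lu_which_belong_to_the_less_orders_at_all_spec : Claim_equal_search_lu_which_belong_to_the_less_orders_at_all := by
  intro lu_list_set batch_list _
  unfold Spec_search_lu_which_belong_to_the_less_orders_at_all
  unfold search_lu_which_belong_to_the_less_orders_at_all search_lu_which_belong_to_the_less_orders_at_all_alt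
  rw [loopA_closed]
  simp only [List.foldl_map]
  rw [zip_filter_map]
  split_ifs <;> simp
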